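-- pv_equiv track=rewrite | github.com/alanbui2808/Leetcode | Google/1055M_Shortest_Way_to_Form_String/solution.py | solution
-- ===== SOURCE A (Python) =====
-- def solution(source, target):
--   '''
--   Algorithm: Greedily
--   (1). We traverse from left to right, greedily construct the longest subsequence to construct the target string.
--   (2). Everytime we meet a character, we need to make sure it's in the source string and the position[character] >
--   position[previous_character] (compared in the source string). If yes then we can extend the current subsequence
--   that we built.
--
--   Problem: We need to effeciently determine if there is character appears after position[previous_character]+1 in the source
--   string. We can do this in O(1) time by preprocessing as following:
--
--   For each character in the source string:
--   next_char[char][i] = next position of "char" starting at i (-1 if there is no)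
--   Formula: next_char[char][i] = i if source[i] == char else next_char[char][i-1]
--
--   e.g: aba --> [0 2 2]
--
--   Time complexity: O(len(26*source) + len(target))
--   '''
--   M = len(source)
--   N = len(target)
--   # dict[i][char]: next position of "char" starting at i (-1 if there is no)
--   # O(26*M) since there can be at most 26 characters
--   next_char = {}
--   for char in source:
--     next_char[char] = [-1 for i in range(M)]
--     # Initialize the base case
--     next_char[char][-1] = -1 if source[-1] != char else M-1
--     for i in reversed(range(M-1)):
--       # update next_char[char][i]
--       next_char[char][i] = next_char[char][i+1] if source[i] != char else i
--
--   result = i = 0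
--   cur_sequence = [] # store the indices (in the source) of char, make sure it's increasing
--
--   # O(N)
--   while i < N:
--     char = target[i]
--     if char not in source:
--       return -1
--
--     if len(cur_sequence) == 0:
--       # get the first position that char appears in source, guarantee it exists (not -1)
--       cur_sequence.append(next_char[char][0])
--       i += 1
--       continue
--
--     # get the position of the previous_char
--     prev_char_position = cur_sequence[-1]
--     # check if char appears after this position
--     if prev_char_position < M-1 and next_char[char][prev_char_position+1] != -1:
--       cur_sequence.append(next_char[char][prev_char_position+1])
--       i += 1
--     else:
--       result += 1
--       # reset cur_sequence
--       cur_sequence = []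
--       # remain i
--
--   return result+1 if len(cur_sequence)>0 else result
-- ===== SOURCE B (Python) =====
-- def solution(source, target):
--     if not target:
--         return 0
--     rounds = 1
--     j = 0
--     for ch in target:
--         p = source.find(ch, j)
--         if p == -1:
--             p = source.find(ch)
--             if p == -1:
--                 return -1
--             rounds += 1
--         j = p + 1
--     return rounds
-- ===== Notes on version B (the rewrite author's own statement) =====
-- stated objective: idiomatic
-- what changed: Replaces A's per-character next-position table (a fresh length-M list built for every character of source), explicit index list cur_sequence and manual restart loop with a single pass over target using str.find(ch, j) to jump to the next occurrence, wrapping (and counting a new round) when none remains.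
import Mathlib
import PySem

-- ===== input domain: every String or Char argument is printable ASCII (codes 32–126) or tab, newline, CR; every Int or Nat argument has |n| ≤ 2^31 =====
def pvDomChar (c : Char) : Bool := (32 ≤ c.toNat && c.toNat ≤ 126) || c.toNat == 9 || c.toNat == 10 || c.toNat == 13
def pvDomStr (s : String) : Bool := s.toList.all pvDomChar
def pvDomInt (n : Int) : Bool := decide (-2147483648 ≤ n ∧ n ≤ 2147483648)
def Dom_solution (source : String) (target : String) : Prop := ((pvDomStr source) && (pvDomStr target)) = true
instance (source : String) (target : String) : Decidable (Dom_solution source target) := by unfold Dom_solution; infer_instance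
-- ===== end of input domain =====

-- B rewrites A idiomatically: one pass over target with str.find(ch, j), no precomputed
-- next-position table and no cur_sequence list; return values are proved identical.

-- ===== PORT A =====
-- next_char[char] = [-1]*M; next_char[char][-1] = …; for i in reversed(range(M-1)): …
-- (index -1 is position M-1; this code only runs with c drawn from s, so s.length ≥ 1
--  and every index used is in range — the pyGetD defaults are unreachable)
def buildRow (s : List Char) (c : Char) : List Int :=
  (PySem.List.pyRange ((s.length : Int) - 2) (-1) (-1)).foldl
    (fun r i =>
      r.set i.toNat
        (if PySem.List.pyGetD s i ' ' ≠ c then PySem.List.pyGetD r (i + 1) (-1) else i))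
    ((List.replicate s.length (-1 : Int)).set (s.length - 1)
      (if PySem.List.pyGetD s (-1) ' ' ≠ c then (-1 : Int) else (s.length : Int) - 1))

-- for char in source: next_char[char] = … (re-inserting the same row on repeats)
def buildNext (s : List Char) : PySem.Dict Char (List Int) :=
  s.foldl (fun d ch => d.insert ch (buildRow s ch)) PySem.Dict.empty

-- the while-loop of A; state (i, result, cur_sequence)
def loopA (s t : List Char) (nc : PySem.Dict Char (List Int)) (M N : Nat)
    (i : Nat) (result : Int) (cur : List Int) : Int :=
  if h : i < N then
    let char := t.getD i ' '
    if s.contains char = false then -1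
    else if hc : cur = [] then
      loopA s t nc M N (i + 1) result
        (cur ++ [PySem.List.pyGetD (nc.getD char []) 0 (-1)])
    else
      let prev := PySem.List.pyGetD cur (-1) 0   -- cur_sequence[-1], cur ≠ []
      if prev < (M : Int) - 1 ∧ PySem.List.pyGetD (nc.getD char []) (prev + 1) (-1) ≠ -1 then
        loopA s t nc M N (i + 1) result
          (cur ++ [PySem.List.pyGetD (nc.getD char []) (prev + 1) (-1)])
      else
        loopA s t nc M N i (result + 1) []
  else if cur = [] then result else result + 1
termination_by (N - i) * 2 + (if cur = [] then 0 else 1)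
decreasing_by
  all_goals simp_all [List.append_eq_nil_iff]
  all_goals omega

def solution (source : String) (target : String) : Int :=
  let s := source.toList
  let t := target.toList
  let nc := buildNext s
  loopA s t nc s.length t.length 0 0 []

-- ===== PORT B =====
-- for ch in target: p = source.find(ch, j); …
def loopB (s : List Char) (rest : List Char) (rounds : Int) (j : Nat) : Int :=
  match rest with
  | [] => rounds
  | ch :: rs =>
    let p := PySem.Chars.findFrom s [ch] (j : Int) none
    if p = -1 then
      let p2 := PySem.Chars.find s [ch]
      if p2 = -1 then -1
      else loopB s rs (rounds + 1) (p2.toNat + 1)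
    else loopB s rs rounds (p.toNat + 1)

def solution_alt (source : String) (target : String) : Int :=
  let s := source.toList
  let t := target.toList
  if t = [] then 0 else loopB s t 1 0

-- ===== PRECONDITION & SPEC =====
def Spec_solution (source : String) (target : String) (out : Int) : Prop := out = solution_alt source target
instance (source : String) (target : String) (out : Int) : Decidable (Spec_solution source target out) := by unfold Spec_solution; infer_instance

-- ===== CLAIM (what is proved, stated in full; the proofs are below) =====
def Claim_equal_solution : Prop := ∀ (source : String) (target : String), Dom_solution source target → Spec_solution source target (solution source target)

-- ===== LEMMAS AND PROOFS =====

-- reference: first index of c in s at position ≥ j, as Python's -1 convention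
def nf (s : List Char) (c : Char) (j : Nat) : Int :=
  ((s.drop j).findIdx? (· == c)).elim (-1) (fun k => ((j + k : Nat) : Int))

theorem singleton_prefix_iff_head? (c : Char) (u : List Char) : [c] <+: u ↔ u.head? = some c := by
  cases u with
  | nil => simp
  | cons x xs => simp [List.cons_prefix_cons, eq_comm]

theorem nf_of_ge (s : List Char) (c : Char) (j : Nat) (h : s.length ≤ j) : nf s c j = -1 := by
  simp [nf, List.drop_eq_nil_of_le h]

theorem nf_step (s : List Char) (c : Char) (j : Nat) (h : j < s.length) :
    nf s c j = if s[j] = c then (j : Int) else nf s c (j + 1) := by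
  unfold nf
  rw [List.drop_eq_getElem_cons h, List.findIdx?_cons]
  by_cases hc : s[j] = c
  · simp [hc]
  · simp only [hc, if_neg hc, beq_iff_eq, decide_eq_true_eq, if_false]
    cases hfi : (s.drop (j + 1)).findIdx? (· == c) <;> simp [hfi] <;> omega

theorem nf_spec (s : List Char) (c : Char) (j : Nat) (h : nf s c j ≠ -1) :
    ∃ q : Nat, nf s c j = (q : Int) ∧ j ≤ q ∧ q < s.length ∧ s[q]? = some c := by
  unfold nf at *
  cases hfi : (s.drop j).findIdx? (· == c) with
  | none => simp [hfi] at h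
  | some k =>
    obtain ⟨hk, hpk, -⟩ := List.findIdx?_eq_some_iff_getElem.mp hfi
    have hk' : k < s.length - j := by simpa using hk
    refine ⟨j + k, by simp [hfi], by omega, by omega, ?_⟩
    rw [List.getElem?_eq_getElem (by omega)]
    simp only [List.getElem_drop, beq_iff_eq, decide_eq_true_eq] at hpk
    simp [hpk]

theorem nf_min (s : List Char) (c : Char) (j : Nat) (q : Nat) (hq : nf s c j = (q : Int)) :
    ∀ i, j ≤ i → i < q → s[i]? ≠ some c := by
  intro i hji hiq
  unfold nf at hq
  cases hfi : (s.drop j).findIdx? (· == c) with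
  | none => rw [hfi] at hq; simp at hq
  | some k =>
    rw [hfi] at hq
    obtain ⟨hk, -, hmin⟩ := List.findIdx?_eq_some_iff_getElem.mp hfi
    simp only [Option.elim, Nat.cast_inj] at hq
    have hk' : k < s.length - j := by simpa using hk
    have hik : i - j < k := by omega
    have := hmin (i - j) hik
    simp only [List.getElem_drop, beq_iff_eq, decide_eq_true_eq] at this
    rw [List.getElem?_eq_getElem (by omega)]
    intro he
    apply this
    have : j + (i - j) = i := by omega
    simp only [this]
    exact Option.some.inj he

theorem nf_of_not_mem (s : List Char) (c : Char) (j : Nat) (h : s.contains c = false) :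
    nf s c j = -1 := by
  have hm : c ∉ s := by simpa using h
  have : (s.drop j).findIdx? (· == c) = none := by
    rw [List.findIdx?_eq_none_iff]
    intro x hx
    have : x ∈ s := List.mem_of_mem_drop hx
    simp only [beq_eq_false_iff_ne, ne_eq]
    intro he; exact hm (he ▸ this)
  simp [nf, this]

theorem nf_zero_ne_of_mem (s : List Char) (c : Char) (h : s.contains c = true) :
    nf s c 0 ≠ -1 := by
  have hm : c ∈ s := by simpa using h
  unfold nf
  cases hfi : (s.drop 0).findIdx? (· == c) with
  | none =>
    rw [List.findIdx?_eq_none_iff] at hfi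
    have := hfi c (by simpa using hm)
    simp at this
  | some k => simp [hfi]

theorem find_single (s : List Char) (c : Char) : PySem.Chars.find s [c] = nf s c 0 := by
  by_cases hm : c ∈ s
  · have hnn : 0 ≤ PySem.Chars.find s [c] := by
      rw [PySem.Chars.find_nonneg_iff, List.singleton_infix_iff]; exact hm
    obtain ⟨hpre, hmin⟩ := PySem.Chars.find_spec hnn
    obtain ⟨q, hq, -, hql, hqc⟩ := nf_spec s c 0 (nf_zero_ne_of_mem s c (by simpa using hm))
    set m := (PySem.Chars.find s [c]).toNat with hmdef
    have hm1 : s[m]? = some c := by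
      rw [singleton_prefix_iff_head?] at hpre
      rwa [List.head?_drop] at hpre
    have hmlen : m < s.length := by
      by_contra hge
      rw [List.getElem?_eq_none (by omega)] at hm1
      simp at hm1
    have hqm : ¬ m < q := fun hlt => nf_min s c 0 q hq m (Nat.zero_le m) hlt hm1
    have hmq : ¬ q < m := by
      intro hlt
      have := hmin q hlt
      rw [singleton_prefix_iff_head?, List.head?_drop] at this
      exact this hqc
    have heq : m = q := by omega
    rw [hq, ← heq, hmdef, Int.toNat_of_nonneg hnn]
  · rw [nf_of_not_mem s c 0 (by simpa using hm)]
    rw [PySem.Chars.find_eq_neg_one_iff, List.singleton_infix_iff]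
    exact hm

theorem nf_shift (s : List Char) (c : Char) (j : Nat) :
    nf s c j = if nf (s.drop j) c 0 = -1 then -1 else (j : Int) + nf (s.drop j) c 0 := by
  simp only [nf, List.drop_zero]
  cases hfi : (s.drop j).findIdx? (· == c) <;> simp [hfi] <;> omega

theorem findFrom_single (s : List Char) (c : Char) (j : Nat) (hj : j ≤ s.length) :
    PySem.Chars.findFrom s [c] (j : Int) none = nf s c j := by
  rw [PySem.Chars.findFrom_natCast s [c] j hj, find_single, nf_shift s c j]

theorem pyGetD_neg_one (s : List Char) (d : Char) (h : 1 ≤ s.length) :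
    PySem.List.pyGetD s (-1) d = s[s.length - 1]'(by omega) := by
  unfold PySem.List.pyGetD PySem.List.pyGet? PySem.List.pyIdx?
  rw [if_neg (by omega), if_pos (by omega)]
  simp [List.getElem?_eq_getElem (by omega : s.length - 1 < s.length)]

-- A's fold body, one step: writing index t extends "correct from t+1 on" to "from t on"
theorem buildRow_step (s : List Char) (c : Char) (t : Nat) (r : List Int)
    (ht : t < s.length) (hlen : r.length = s.length)
    (hr : ∀ k, t + 1 ≤ k → r.getD k (-1) = nf s c k) :
    (r.set t (if PySem.List.pyGetD s (t : Int) ' ' ≠ c then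
        PySem.List.pyGetD r ((t : Int) + 1) (-1) else (t : Int))).length = s.length ∧
    ∀ k, t ≤ k → (r.set t (if PySem.List.pyGetD s (t : Int) ' ' ≠ c then
        PySem.List.pyGetD r ((t : Int) + 1) (-1) else (t : Int))).getD k (-1) = nf s c k := by
  have hs : PySem.List.pyGetD s (t : Int) ' ' = s[t] := by
    rw [PySem.List.pyGetD_natCast, List.getD_eq_getElem?_getD,
      List.getElem?_eq_getElem ht, Option.getD_some]
  have hr1 : PySem.List.pyGetD r ((t : Int) + 1) (-1) = nf s c (t + 1) := by
    rw [show ((t : Int) + 1) = ((t + 1 : Nat) : Int) by push_cast; ring,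
      PySem.List.pyGetD_natCast]
    exact hr (t + 1) le_rfl
  refine ⟨by simp [hlen], ?_⟩
  intro k hk
  rw [List.getD_eq_getElem?_getD, List.getElem?_set]
  by_cases hkt : t = k
  · subst hkt
    rw [if_pos rfl, if_pos (by omega), Option.getD_some, hs, hr1, nf_step s c t ht]
    by_cases hc : s[t] = c <;> simp [hc]
  · rw [if_neg hkt, ← List.getD_eq_getElem?_getD]
    exact hr k (by omega)

-- A's reversed(range(M-1)) fold, run from index t down to 0
theorem buildRow_fold (s : List Char) (c : Char) :
    ∀ (t : Nat) (r : List Int), r.length = s.length → t + 1 ≤ s.length →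
    (∀ k, t + 1 ≤ k → r.getD k (-1) = nf s c k) →
    ∀ k, ((PySem.List.pyRange (t : Int) (-1) (-1)).foldl
      (fun r i => r.set i.toNat (if PySem.List.pyGetD s i ' ' ≠ c then
        PySem.List.pyGetD r (i + 1) (-1) else i)) r).getD k (-1) = nf s c k := by
  intro t
  induction t with
  | zero =>
    intro r hlen hts hr k
    rw [PySem.List.pyRange_neg_one_cons (by omega),
      PySem.List.pyRange_neg_one_eq_nil (by omega)]
    simp only [List.foldl_cons, List.foldl_nil, Int.toNat_zero]
    have := buildRow_step s c 0 r (by omega) hlen hr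
    simp only [Int.toNat_natCast]
    exact (this.2) k (Nat.zero_le k)
  | succ t ih =>
    intro r hlen hts hr k
    rw [PySem.List.pyRange_neg_one_cons (by omega)]
    simp only [List.foldl_cons, Int.toNat_natCast]
    have hstep := buildRow_step s c (t + 1) r (by omega) hlen hr
    rw [show ((t + 1 : Nat) : Int) - 1 = ((t : Nat) : Int) by push_cast; ring]
    exact ih _ hstep.1 (by omega) (fun k2 hk2 => hstep.2 k2 (by omega)) k

-- A's table row computes nf
theorem buildRow_spec (s : List Char) (c : Char) (hM : 1 ≤ s.length) (k : Nat) :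
    PySem.List.pyGetD (buildRow s c) (k : Int) (-1) = nf s c k := by
  unfold buildRow
  rw [PySem.List.pyGetD_natCast]
  set row0 := (List.replicate s.length (-1 : Int)).set (s.length - 1)
      (if PySem.List.pyGetD s (-1) ' ' ≠ c then (-1 : Int) else (s.length : Int) - 1) with hrow0
  have hlen0 : row0.length = s.length := by simp [hrow0]
  have hbase : ∀ k2, s.length - 1 ≤ k2 → row0.getD k2 (-1) = nf s c k2 := by
    intro k2 hk2
    rw [hrow0, List.getD_eq_getElem?_getD, List.getElem?_set]
    by_cases hke : s.length - 1 = k2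
    · subst hke
      rw [if_pos rfl, if_pos (by simp; omega), Option.getD_some,
        pyGetD_neg_one s ' ' hM, nf_step s c (s.length - 1) (by omega)]
      rw [nf_of_ge s c (s.length - 1 + 1) (by omega)]
      by_cases hc : s[s.length - 1] = c <;> simp [hc] <;> omega
    · have hk2' : s.length ≤ k2 := by omega
      rw [if_neg hke, List.getElem?_eq_none (by simpa using hk2'), Option.getD_none]
      rw [nf_of_ge s c k2 hk2']
  by_cases hM1 : s.length = 1
  · rw [PySem.List.pyRange_neg_one_eq_nil (by omega)]
    simp only [List.foldl_nil]
    exact hbase k (by omega)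
  · have h2 : 2 ≤ s.length := by omega
    rw [show ((s.length : Int) - 2) = ((s.length - 2 : Nat) : Int) by push_cast [h2]; ring]
    exact buildRow_fold s c (s.length - 2) row0 hlen0 (by omega)
      (fun k2 hk2 => hbase k2 (by omega)) k

-- A's dict maps every char of s to its row
theorem buildNext_fold (s : List Char) (c : Char) :
    ∀ (l : List Char) (d : PySem.Dict Char (List Int)),
    (l.foldl (fun d ch => d.insert ch (buildRow s ch)) d).getD c [] =
      if c ∈ l then buildRow s c else d.getD c [] := by
  intro l
  induction l with
  | nil => simp
  | cons x xs ih =>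
    intro d
    simp only [List.foldl_cons, ih, List.mem_cons]
    by_cases hx : c ∈ xs
    · simp [hx]
    · by_cases hcx : c = x
      · simp [hx, hcx, PySem.Dict.getD_insert]
      · simp [hx, hcx, PySem.Dict.getD_insert]

theorem buildNext_getD (s : List Char) (c : Char) (h : c ∈ s) :
    (buildNext s).getD c [] = buildRow s c := by
  unfold buildNext
  rw [buildNext_fold s c s PySem.Dict.empty, if_pos h]

theorem pyGetD_last (l : List Int) (x : Int) (d : Int) :
    PySem.List.pyGetD (l ++ [x]) (-1) d = x := by
  simp [PySem.List.pyGetD, PySem.List.pyGet?, PySem.List.pyIdx?]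

theorem drop_head (t : List Char) (i : Nat) (ch : Char) (rs : List Char)
    (h : t.drop i = ch :: rs) : t[i]? = some ch := by
  have h0 : (t.drop i)[0]? = t[i + 0]? := List.getElem?_drop
  rw [h] at h0
  simpa using h0.symm

theorem drop_tail (t : List Char) (i : Nat) (ch : Char) (rs : List Char)
    (h : t.drop i = ch :: rs) : t.drop (i + 1) = rs := by
  have := congrArg List.tail h
  simpa [List.tail_drop] using this

-- main loop equivalence, nonempty cur_sequence with last element p
theorem loop_equiv (s : List Char) (t : List Char) :
    ∀ (rs : List Char) (i : Nat) (r : Int) (cur : List Int) (p : Nat),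
    t.drop i = rs → i + rs.length = t.length →
    cur ≠ [] → PySem.List.pyGetD cur (-1) 0 = (p : Int) → p < s.length →
    loopA s t (buildNext s) s.length t.length i r cur = loopB s rs (r + 1) (p + 1) := by
  intro rs
  induction rs with
  | nil =>
    intro i r cur p hdrop hi hcur hlast hp
    have hge : ¬ i < t.length := by simp at hi; omega
    rw [loopA]
    simp [hge, hcur, loopB]
  | cons ch rs ih =>
    intro i r cur p hdrop hi hcur hlast hp
    have hiN : i < t.length := by simp at hi; omega
    have hti : t[i]? = some ch := drop_head t i ch rs hdrop
    have htD : t.getD i ' ' = ch := by simp [List.getD_eq_getElem?_getD, hti]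
    have hdrop' : t.drop (i + 1) = rs := drop_tail t i ch rs hdrop
    have hi' : (i + 1) + rs.length = t.length := by simp at hi ⊢; omega
    have hp1 : p + 1 ≤ s.length := hp
    have hfF : PySem.Chars.findFrom s [ch] ((p + 1 : Nat) : Int) none = nf s ch (p + 1) :=
      findFrom_single s ch (p + 1) hp1
    by_cases hmem : s.contains ch
    · have hchs : ch ∈ s := by simpa using hmem
      have hM : 1 ≤ s.length := List.length_pos_of_mem hchs
      have hrow : (buildNext s).getD ch [] = buildRow s ch := buildNext_getD s ch hchs
      have hkey : PySem.List.pyGetD ((buildNext s).getD ch []) ((p : Int) + 1) (-1) =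
          nf s ch (p + 1) := by
        rw [hrow, show ((p : Int) + 1) = ((p + 1 : Nat) : Int) by push_cast; ring]
        exact buildRow_spec s ch hM (p + 1)
      have hkey0 : PySem.List.pyGetD ((buildNext s).getD ch []) 0 (-1) = nf s ch 0 := by
        rw [hrow, show (0 : Int) = ((0 : Nat) : Int) by simp]
        exact buildRow_spec s ch hM 0
      by_cases hnf : nf s ch (p + 1) = -1
      · -- no occurrence after p: A resets then consumes; B wraps
        obtain ⟨q0, hq0, -, hq0l, -⟩ := nf_spec s ch 0 (nf_zero_ne_of_mem s ch hmem)
        rw [loopA]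
        simp only [dif_pos hiN, htD, hmem, Bool.true_eq_false, if_false, dif_neg hcur,
          hlast, hkey, hnf]
        rw [if_neg (by simp)]
        rw [loopA]
        simp only [dif_pos hiN, htD, hmem, Bool.true_eq_false, if_false, eq_self_iff_true,
          dite_true, ite_true, List.nil_append, hkey0, hq0]
        rw [ih (i + 1) (r + 1) [(q0 : Int)] q0 hdrop' hi' (by simp)
          (pyGetD_last [] (q0 : Int) 0) hq0l]
        simp only [loopB, hfF, hnf, find_single, hq0, eq_self_iff_true, if_true, ite_true]
        rw [if_neg (by omega), Int.toNat_natCast]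
      · -- next occurrence q exists: both jump to it
        obtain ⟨q, hq, hqp, hql, -⟩ := nf_spec s ch (p + 1) hnf
        rw [loopA]
        simp only [dif_pos hiN, htD, hmem, Bool.true_eq_false, if_false, dif_neg hcur,
          hlast, hkey, hq]
        rw [if_pos ⟨by push_cast; omega, by omega⟩]
        rw [ih (i + 1) r (cur ++ [(q : Int)]) q hdrop' hi' (by simp)
          (pyGetD_last cur (q : Int) 0) hql]
        simp only [loopB, hfF, hq]
        rw [if_neg (by omega), Int.toNat_natCast]
    · -- ch not in source: both return -1
      rw [loopA]
      simp only [dif_pos hiN, htD]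
      rw [if_pos (by simpa using hmem)]
      simp only [loopB, hfF, nf_of_not_mem s ch (p + 1) (by simpa using hmem),
        eq_self_iff_true, if_true, ite_true]
      rw [find_single, nf_of_not_mem s ch 0 (by simpa using hmem), if_pos rfl]

-- the whole programs agree (first iteration of A's loop peeled off by hand)
theorem solution_equiv (s t : List Char) :
    loopA s t (buildNext s) s.length t.length 0 0 [] =
      (if t = [] then 0 else loopB s t 1 0) := by
  cases t with
  | nil => rw [loopA]; simp
  | cons ch t' =>
    rw [if_neg (by simp)]
    have hiN : 0 < (ch :: t').length := by simp
    have htD : (ch :: t').getD 0 ' ' = ch := rfl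
    have hfF0 : PySem.Chars.findFrom s [ch] (0 : Int) none = nf s ch 0 := by
      simpa using findFrom_single s ch 0 (by omega)
    by_cases hmem : s.contains ch
    · have hchs : ch ∈ s := by simpa using hmem
      have hM : 1 ≤ s.length := List.length_pos_of_mem hchs
      have hkey0 : PySem.List.pyGetD ((buildNext s).getD ch []) 0 (-1) = nf s ch 0 := by
        rw [buildNext_getD s ch hchs, show (0 : Int) = ((0 : Nat) : Int) by simp]
        exact buildRow_spec s ch hM 0
      obtain ⟨q0, hq0, -, hq0l, -⟩ := nf_spec s ch 0 (nf_zero_ne_of_mem s ch hmem)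
      rw [loopA]
      simp only [dif_pos hiN, htD, hmem, Bool.true_eq_false, if_false, eq_self_iff_true,
        dite_true, ite_true, List.nil_append, hkey0, hq0]
      rw [loop_equiv s (ch :: t') t' 1 0 [(q0 : Int)] q0 (by simp) (by simp; omega)
        (by simp) (pyGetD_last [] (q0 : Int) 0) hq0l]
      simp only [loopB, Nat.cast_zero, hfF0, hq0]
      rw [if_neg (by omega), Int.toNat_natCast]
      norm_num
    · rw [loopA]
      simp only [dif_pos hiN, htD]
      rw [if_pos (by simpa using hmem)]
      simp only [loopB, Nat.cast_zero, hfF0,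
        nf_of_not_mem s ch 0 (by simpa using hmem), eq_self_iff_true, if_true, ite_true]
      rw [find_single, nf_of_not_mem s ch 0 (by simpa using hmem), if_pos rfl]

-- ===== VERDICT (by name: the statement is the Claim_ definition above) =====
theorem solution_spec : Claim_equal_solution := by
  unfold Claim_equal_solution
  intro source target _
  unfold Spec_solution solution solution_alt
  exact solution_equiv source.toList target.toList
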